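-- pv_equiv track=rewrite | github.com/thecuriousnobody/AIAgents | podcastHelperAgents/podcastEditorAssistant_V2.py | split_transcript_into_chunks
-- ===== SOURCE A (Python) =====
-- def split_transcript_into_chunks(transcript, chunk_size=4):
--     """Split transcript into chunks of roughly chunk_size paragraphs each."""
--     lines = transcript.split('\n')
--     chunks = []
--     current_chunk = []
--     paragraph_count = 0
--
--     for line in lines:
--         current_chunk.append(line)
--
--         # Count empty lines as paragraph separators
--         if not line.strip():
--             paragraph_count += 1
--
--             # When we reach chunk_size paragraphs, save the chunk
--             if paragraph_count >= chunk_size: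
--                 chunks.append('\n'.join(current_chunk))
--                 current_chunk = []
--                 paragraph_count = 0
--
--     # Add any remaining lines as the last chunk
--     if current_chunk:
--         chunks.append('\n'.join(current_chunk))
--
--     return chunks
-- ===== SOURCE B (Python) =====
-- def split_transcript_into_chunks(transcript, chunk_size=4):
--     """Two-pass version: find cut indices first, then slice the lines list."""
--     lines = transcript.split('\n')
--     boundaries = []
--     count = 0
--     for i, line in enumerate(lines):
--         if not line.strip():
--             count += 1
--             if count >= chunk_size:
--                 boundaries.append(i + 1)
--                 count = 0
--     chunks = []
--     prev = 0
--     for cut in boundaries: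
--         chunks.append('\n'.join(lines[prev:cut]))
--         prev = cut
--     if prev < len(lines):
--         chunks.append('\n'.join(lines[prev:]))
--     return chunks
-- ===== Notes on version B (the rewrite author's own statement) =====
-- stated objective: alternative
-- what changed: A accumulates lines into a current chunk and flushes it when the blank-line counter reaches chunk_size; B first computes the list of cut indices in one pass over enumerate(lines) and then builds each chunk by slicing the lines list between consecutive cuts.
import Mathlib
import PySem

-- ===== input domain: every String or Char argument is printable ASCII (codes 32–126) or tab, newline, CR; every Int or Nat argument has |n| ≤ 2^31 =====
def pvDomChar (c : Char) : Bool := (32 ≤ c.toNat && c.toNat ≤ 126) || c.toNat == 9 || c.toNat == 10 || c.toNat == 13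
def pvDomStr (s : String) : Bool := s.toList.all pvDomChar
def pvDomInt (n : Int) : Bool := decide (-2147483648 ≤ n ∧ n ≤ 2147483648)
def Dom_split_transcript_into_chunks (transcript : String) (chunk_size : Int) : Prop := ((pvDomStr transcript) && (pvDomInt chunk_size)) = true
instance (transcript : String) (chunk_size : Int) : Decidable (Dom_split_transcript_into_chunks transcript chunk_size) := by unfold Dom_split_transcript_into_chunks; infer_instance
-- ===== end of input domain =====

-- B replaces A's accumulate-and-flush single pass by two passes (collect cut indices, then
-- slice the lines list); objective: alternative decomposition, same cost; A is total and
-- equivalence is proved on all inputs.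

-- ===== PORT A =====
-- "not line.strip()" : the stripped line is empty
def pvBlank (line : String) : Bool := PySem.Str.strip line == ""

-- loop body of A's single pass: state = (chunks, current_chunk, paragraph_count)
def pvStepA (chunk_size : Int) (st : List String × List String × Int) (line : String) :
    List String × List String × Int :=
  let chunks := st.1
  let cur := st.2.1 ++ [line]
  if pvBlank line then
    let cnt := st.2.2 + 1
    if cnt ≥ chunk_size then (chunks ++ [PySem.Str.join "\n" cur], [], 0)
    else (chunks, cur, cnt)
  else (chunks, cur, st.2.2)

def split_transcript_into_chunks (transcript : String) (chunk_size : Int) : List String :=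
  let lines := (PySem.Str.split? transcript "\n").getD []
  let st := lines.foldl (pvStepA chunk_size) ([], [], 0)
  if st.2.1 = [] then st.1 else st.1 ++ [PySem.Str.join "\n" st.2.1]

-- ===== PORT B =====
-- first pass: collect boundary indices i+1 each time the blank-line count reaches chunk_size
def pvStepBnd (chunk_size : Int) (st : List Int × Int) (p : Int × String) : List Int × Int :=
  if pvBlank p.2 then
    let cnt := st.2 + 1
    if cnt ≥ chunk_size then (st.1 ++ [p.1 + 1], 0) else (st.1, cnt)
  else st

-- second pass: slice the lines list at consecutive boundaries
def pvStepCut (lines : List String) (st : List String × Int) (cut : Int) : List String × Int :=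
  (st.1 ++ [PySem.Str.join "\n" (PySem.List.slice lines (some st.2) (some cut))], cut)

def split_transcript_into_chunks_alt (transcript : String) (chunk_size : Int) : List String :=
  let lines := (PySem.Str.split? transcript "\n").getD []
  let bst := (PySem.List.enumerate lines 0).foldl (pvStepBnd chunk_size) ([], 0)
  let cst := bst.1.foldl (pvStepCut lines) ([], 0)
  if cst.2 < (lines.length : Int) then
    cst.1 ++ [PySem.Str.join "\n" (PySem.List.slice lines (some cst.2) none)]
  else cst.1

-- ===== PRECONDITION & SPEC =====
def Spec_split_transcript_into_chunks (transcript : String) (chunk_size : Int) (out : List String) : Prop := out = split_transcript_into_chunks_alt transcript chunk_size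
instance (transcript : String) (chunk_size : Int) (out : List String) : Decidable (Spec_split_transcript_into_chunks transcript chunk_size out) := by unfold Spec_split_transcript_into_chunks; infer_instance

-- ===== CLAIM (what is proved, stated in full; the proofs are below) =====
def Claim_equal_split_transcript_into_chunks : Prop := ∀ (transcript : String) (chunk_size : Int), Dom_split_transcript_into_chunks transcript chunk_size → Spec_split_transcript_into_chunks transcript chunk_size (split_transcript_into_chunks transcript chunk_size)

-- ===== LEMMAS AND PROOFS =====

-- A's final "if current_chunk" step
def pvFinal (st : List String × List String × Int) : List String :=
  if st.2.1 = [] then st.1 else st.1 ++ [PySem.Str.join "\n" st.2.1]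

-- B's final "if prev < len(lines)" step
def pvFinalB (lines : List String) (st : List String × Int) : List String :=
  if st.2 < (lines.length : Int) then
    st.1 ++ [PySem.Str.join "\n" (PySem.List.slice lines (some st.2) none)]
  else st.1

-- recursive characterisation of A's flush loop
def pvEmit (k : Int) : List String → List String → Int → List String
  | [], cur, _ => if cur = [] then [] else [PySem.Str.join "\n" cur]
  | l :: rest, cur, cnt =>
    if pvBlank l then
      if cnt + 1 ≥ k then PySem.Str.join "\n" (cur ++ [l]) :: pvEmit k rest [] 0
      else pvEmit k rest (cur ++ [l]) (cnt + 1)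
    else pvEmit k rest (cur ++ [l]) cnt

-- B's boundary list, with Nat indices
def pvBds (k : Int) : Nat → List String → Int → List Nat × Int
  | _, [], cnt => ([], cnt)
  | i, l :: rest, cnt =>
    if pvBlank l then
      if cnt + 1 ≥ k then
        let r := pvBds k (i + 1) rest 0
        ((i + 1) :: r.1, r.2)
      else pvBds k (i + 1) rest (cnt + 1)
    else pvBds k (i + 1) rest cnt

-- B's second pass, with drop/take instead of slices
def pvSecond (lines : List String) : Nat → List Nat → List String
  | prev, [] => if prev < lines.length then [PySem.Str.join "\n" (lines.drop prev)] else []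
  | prev, c :: bs => PySem.Str.join "\n" ((lines.drop prev).take (c - prev)) :: pvSecond lines c bs

theorem pvFoldA (k : Int) (rest : List String) (chunks cur : List String) (cnt : Int) :
    pvFinal (rest.foldl (pvStepA k) (chunks, cur, cnt)) = chunks ++ pvEmit k rest cur cnt := by
  induction rest generalizing chunks cur cnt with
  | nil =>
    simp only [List.foldl_nil, pvFinal, pvEmit]
    by_cases hc : cur = [] <;> simp [hc]
  | cons l rest ih =>
    simp only [List.foldl_cons, pvStepA, pvEmit]
    split_ifs with hb hk
    · rw [ih]; simp
    · rw [ih]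
    · rw [ih]

theorem pvFoldBnd (k : Int) (rest : List String) (i : Nat) (bnds : List Int) (cnt : Int) :
    (PySem.List.enumerate rest (i : Int)).foldl (pvStepBnd k) (bnds, cnt)
    = (bnds ++ (pvBds k i rest cnt).1.map (fun n : Nat => (n : Int)), (pvBds k i rest cnt).2) := by
  induction rest generalizing i bnds cnt with
  | nil => simp [pvBds, PySem.List.enumerate_nil]
  | cons l rest ih =>
    rw [PySem.List.enumerate_cons]
    have hcast : ((i : Int) + 1) = ((i + 1 : Nat) : Int) := by push_cast; ring
    simp only [List.foldl_cons, pvStepBnd, pvBds]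
    split_ifs with hb hk
    · rw [hcast, ih]; simp
    · rw [hcast, ih]
    · rw [hcast, ih]

theorem pvFoldCut (lines : List String) (bnds : List Nat) (chunks : List String) (prev : Nat) :
    pvFinalB lines ((bnds.map (fun n : Nat => (n : Int))).foldl (pvStepCut lines) (chunks, (prev : Int)))
    = chunks ++ pvSecond lines prev bnds := by
  induction bnds generalizing chunks prev with
  | nil =>
    simp only [List.map_nil, List.foldl_nil, pvFinalB, pvSecond, PySem.List.slice_from_natCast]
    by_cases h : prev < lines.length
    · rw [if_pos (by exact_mod_cast h), if_pos h]
    · rw [if_neg (by exact_mod_cast h), if_neg h]; simp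
  | cons c bs ih =>
    simp only [List.map_cons, List.foldl_cons, pvSecond]
    rw [show pvStepCut lines (chunks, (prev : Int)) (c : Int)
        = (chunks ++ [PySem.Str.join "\n" ((lines.drop prev).take (c - prev))], (c : Int)) from by
      simp [pvStepCut, PySem.List.slice_natCast]]
    simpa using ih (chunks ++ [PySem.Str.join "\n" ((lines.drop prev).take (c - prev))]) c

theorem pvDropApp (pre : List String) (l : String) (prev : Nat) (h : prev ≤ pre.length) :
    (pre ++ [l]).drop prev = pre.drop prev ++ [l] := by
  rw [List.drop_append]
  simp [show prev - pre.length = 0 from by omega]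

theorem pvDropTake (pre rest : List String) (l : String) (prev : Nat) (h : prev ≤ pre.length) :
    ((pre ++ l :: rest).drop prev).take (pre.length + 1 - prev) = pre.drop prev ++ [l] := by
  rw [show pre ++ l :: rest = (pre ++ [l]) ++ rest from by simp, List.drop_append,
    show prev - (pre ++ [l]).length = 0 from by simp; omega, List.drop_zero,
    List.take_append_of_le_length (by simp), pvDropApp pre l prev h]
  exact List.take_of_length_le (by simp; omega)

theorem pvMain (k : Int) (rest pre : List String) (prev : Nat) (cnt : Int)
    (h : prev ≤ pre.length) :
    pvSecond (pre ++ rest) prev (pvBds k pre.length rest cnt).1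
    = pvEmit k rest (pre.drop prev) cnt := by
  induction rest generalizing pre prev cnt with
  | nil =>
    simp only [pvBds, pvSecond, pvEmit, List.append_nil]
    by_cases h1 : prev < pre.length
    · rw [if_pos h1, if_neg (by rw [List.drop_eq_nil_iff]; omega)]
    · rw [if_neg h1, if_pos (by rw [List.drop_eq_nil_iff]; omega)]
  | cons l rest ih =>
    have hre : pre ++ l :: rest = (pre ++ [l]) ++ rest := by simp
    have hlen : pre.length + 1 = (pre ++ [l]).length := by simp
    simp only [pvBds, pvEmit]
    split_ifs with hb hk
    · show pvSecond (pre ++ l :: rest) prev ((pre.length + 1) :: (pvBds k (pre.length + 1) rest 0).1)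
        = _
      simp only [pvSecond]
      rw [pvDropTake pre rest l prev h, hre, hlen,
        ih (pre ++ [l]) (pre ++ [l]).length 0 (le_refl _), List.drop_length]
    · rw [hre, hlen, ih (pre ++ [l]) prev (cnt + 1) (by simp; omega),
        pvDropApp pre l prev h]
    · rw [hre, hlen, ih (pre ++ [l]) prev cnt (by simp; omega),
        pvDropApp pre l prev h]

-- ===== VERDICT (by name: the statement is the Claim_ definition above) =====
theorem split_transcript_into_chunks_spec : Claim_equal_split_transcript_into_chunks := by
  intro transcript chunk_size _
  unfold Spec_split_transcript_into_chunks
  unfold split_transcript_into_chunks split_transcript_into_chunks_alt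
  show pvFinal (((PySem.Str.split? transcript "\n").getD []).foldl (pvStepA chunk_size) ([], [], 0))
    = pvFinalB ((PySem.Str.split? transcript "\n").getD [])
        ((((PySem.List.enumerate ((PySem.Str.split? transcript "\n").getD []) ((0 : Nat) : Int)).foldl
            (pvStepBnd chunk_size) ([], 0)).1).foldl
          (pvStepCut ((PySem.Str.split? transcript "\n").getD [])) ([], ((0 : Nat) : Int)))
  set lines := (PySem.Str.split? transcript "\n").getD [] with hl
  rw [pvFoldBnd chunk_size lines 0 [] 0]
  simp only [List.nil_append]
  rw [pvFoldCut lines (pvBds chunk_size 0 lines 0).1 [] 0]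
  have hm := pvMain chunk_size lines [] 0 0 (by simp)
  simp only [List.nil_append, List.drop_nil, List.length_nil] at hm
  rw [hm, pvFoldA chunk_size lines [] [] 0]
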